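-- pv_equiv track=rewrite | github.com/fedallah-jr/ncs-simulator | ncs_env/joint_action_env.py | encode_joint_action
-- ===== SOURCE A (Python) =====
-- from typing import Any, Dict, List, Optional, Sequence, Tuple
--
-- def encode_joint_action(actions: Sequence[int], n_actions: int) -> int:
--     """Encode per-agent discrete actions into a single flat joint action index."""
--     if n_actions <= 0:
--         raise ValueError("n_actions must be positive")
--     if len(actions) == 0:
--         raise ValueError("actions must be non-empty")
--
--     action_index = 0
--     base = 1
--     for action in actions:
--         action_int = int(action)
--         if action_int < 0 or action_int >= n_actions:
--             raise ValueError(f"action {action_int} out of bounds for n_actions={n_actions}")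
--         action_index += action_int * base
--         base *= n_actions
--     return int(action_index)
-- ===== SOURCE B (Python) =====
-- def encode_joint_action(actions, n_actions):
--     """Encode per-agent discrete actions into a single flat joint action index."""
--     if n_actions <= 0:
--         raise ValueError("n_actions must be positive")
--     if len(actions) == 0:
--         raise ValueError("actions must be non-empty")
--     vals = []
--     for action in actions:
--         action_int = int(action)
--         if action_int < 0 or action_int >= n_actions:
--             raise ValueError(f"action {action_int} out of bounds for n_actions={n_actions}")
--         vals.append(action_int)
--     result = 0
--     for a in reversed(vals):
--         result = result * n_actions + a
--     return int(result)
-- ===== Notes on version B (the rewrite author's own statement) =====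
-- stated objective: idiomatic
-- what changed: Replaces the running-base mixed-radix accumulation with a forward validation pass followed by Horner's method over the reversed actions, eliminating the 'base' variable.
import Mathlib
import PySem

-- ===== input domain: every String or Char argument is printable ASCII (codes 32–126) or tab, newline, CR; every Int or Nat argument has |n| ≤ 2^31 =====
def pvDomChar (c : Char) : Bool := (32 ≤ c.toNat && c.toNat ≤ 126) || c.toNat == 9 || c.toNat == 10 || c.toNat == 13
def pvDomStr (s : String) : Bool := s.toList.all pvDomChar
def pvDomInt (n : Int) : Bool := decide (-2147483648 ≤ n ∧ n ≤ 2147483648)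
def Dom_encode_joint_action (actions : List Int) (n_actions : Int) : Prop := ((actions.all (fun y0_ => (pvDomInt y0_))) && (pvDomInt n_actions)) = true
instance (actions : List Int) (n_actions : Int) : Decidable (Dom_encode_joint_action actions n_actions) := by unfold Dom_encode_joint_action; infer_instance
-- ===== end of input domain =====

-- B replaces A's running-base mixed-radix accumulation with a forward validation
-- pass followed by Horner's method over the reversed actions (idiomatic decomposition).


-- ===== PORT A =====
-- A's loop: state (action_index, base); 'none' marks the out-of-bounds raise
-- (unreachable under Pre_; the port returns 0 there).
def encJAStep (n : Int) : Option (Int × Int) → Int → Option (Int × Int)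
  | none, _ => none
  | some (idx, base), a => if a < 0 ∨ a ≥ n then none else some (idx + a * base, base * n)

def encode_joint_action (actions : List Int) (n_actions : Int) : Int :=
  if n_actions ≤ 0 then 0
  else if actions = [] then 0
  else
    match actions.foldl (encJAStep n_actions) (some (0, 1)) with
    | none => 0
    | some (idx, _) => idx

-- ===== PORT B =====
-- forward validation pass: 'none' marks the first out-of-bounds raise
def encJAValidate (n : Int) : List Int → Option (List Int)
  | [] => some []
  | a :: rest => if a < 0 ∨ a ≥ n then none else (encJAValidate n rest).map (a :: ·)

def encode_joint_action_alt (actions : List Int) (n_actions : Int) : Int :=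
  if n_actions ≤ 0 then 0
  else if actions = [] then 0
  else
    match encJAValidate n_actions actions with
    | none => 0
    | some vals => vals.reverse.foldl (fun r a => r * n_actions + a) 0

-- ===== PRECONDITION & SPEC =====
-- Pre_ excludes exactly the inputs where A raises ValueError: non-positive
-- n_actions, empty actions, or some action out of [0, n_actions).
def Pre_encode_joint_action (actions : List Int) (n_actions : Int) : Prop :=
  0 < n_actions ∧ actions ≠ [] ∧ ∀ a ∈ actions, 0 ≤ a ∧ a < n_actions
instance (actions : List Int) (n_actions : Int) : Decidable (Pre_encode_joint_action actions n_actions) := by unfold Pre_encode_joint_action; infer_instance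

def pvWitness_encode_joint_action : List Int × Int := ([2, 0, 1], 3)

def Spec_encode_joint_action (actions : List Int) (n_actions : Int) (out : Int) : Prop := out = encode_joint_action_alt actions n_actions
instance (actions : List Int) (n_actions : Int) (out : Int) : Decidable (Spec_encode_joint_action actions n_actions out) := by unfold Spec_encode_joint_action; infer_instance

-- ===== CLAIM (what is proved, stated in full; the proofs are below) =====
def Claim_equal_encode_joint_action : Prop := ∀ (actions : List Int) (n_actions : Int), Dom_encode_joint_action actions n_actions → Pre_encode_joint_action actions n_actions → Spec_encode_joint_action actions n_actions (encode_joint_action actions n_actions)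

-- ===== LEMMAS AND PROOFS =====

-- little-endian mixed-radix value, the common specification of both loops
def encJAVal (n : Int) : List Int → Int
  | [] => 0
  | a :: t => a + n * encJAVal n t

theorem encJAStep_fold (n : Int) (l : List Int) (h : ∀ a ∈ l, 0 ≤ a ∧ a < n) :
    ∀ idx base, l.foldl (encJAStep n) (some (idx, base)) =
      some (idx + base * encJAVal n l, base * n ^ l.length) := by
  induction l with
  | nil => intro idx base; simp [encJAVal]
  | cons a t ih =>
    intro idx base
    obtain ⟨ha0, han⟩ := h a (List.mem_cons_self)
    simp only [List.foldl_cons, encJAStep, if_neg (by omega : ¬(a < 0 ∨ a ≥ n))]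
    rw [ih (fun x hx => h x (List.mem_cons_of_mem _ hx))]
    simp [encJAVal]; constructor <;> ring

theorem encJAValidate_id (n : Int) (l : List Int) (h : ∀ a ∈ l, 0 ≤ a ∧ a < n) :
    encJAValidate n l = some l := by
  induction l with
  | nil => simp [encJAValidate]
  | cons a t ih =>
    obtain ⟨ha0, han⟩ := h a (List.mem_cons_self)
    simp only [encJAValidate, if_neg (by omega : ¬(a < 0 ∨ a ≥ n))]
    rw [ih (fun x hx => h x (List.mem_cons_of_mem _ hx))]
    rfl

theorem encJAHorner (n : Int) (l : List Int) :
    l.reverse.foldl (fun r a => r * n + a) 0 = encJAVal n l := by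
  induction l with
  | nil => simp [encJAVal]
  | cons a t ih =>
    simp only [List.reverse_cons, List.foldl_append, List.foldl_cons, List.foldl_nil, ih, encJAVal]
    ring

-- ===== VERDICT (by name: the statement is the Claim_ definition above) =====
theorem encode_joint_action_spec : Claim_equal_encode_joint_action := by
  intro actions n_actions _ ⟨hn, hne, hb⟩
  unfold Spec_encode_joint_action encode_joint_action encode_joint_action_alt
  rw [if_neg (by omega), if_neg hne, if_neg (by omega), if_neg hne,
    encJAValidate_id n_actions actions hb, encJAStep_fold n_actions actions hb 0 1]
  show 0 + 1 * encJAVal n_actions actions = List.foldl (fun r a => r * n_actions + a) 0 actions.reverse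
  rw [encJAHorner]
  ring
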